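-- pv_equiv track=rewrite | github.com/CharviThallapally/chatbot | chatbot.py | get_response_category
-- ===== SOURCE A (Python) =====
-- def get_response_category(user_input):
--     user_input = user_input.lower()
--     if any(word in user_input for word in ["hello", "hi", "hey"]):
--         return "greeting"
--     elif any(word in user_input for word in ["bye", "goodbye", "see you"]):
--         return "farewell"
--     elif any(word in user_input for word in ["thanks", "thank"]):
--         return "thanks"
--     elif any(word in user_input for word in ["feel", "feeling"]):
--         return "feeling"
--     elif any(word in user_input for word in ["joke", "funny"]):
--         return "joke"
--     else:
--         return "default"
-- ===== SOURCE B (Python) =====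
-- def get_response_category(user_input):
--     # Single left-to-right scan of the text: at each position, update one flag
--     # per category via startswith with a tuple of keywords; then resolve the
--     # flags in priority order. One streaming pass instead of five staged
--     # substring searches.
--     text = user_input.lower()
--     greeting = farewell = thanks = feeling = joke = False
--     for i in range(len(text)):
--         greeting = greeting or text.startswith(("hello", "hi", "hey"), i)
--         farewell = farewell or text.startswith(("bye", "goodbye", "see you"), i)
--         thanks = thanks or text.startswith(("thanks", "thank"), i)
--         feeling = feeling or text.startswith(("feel", "feeling"), i)
--         joke = joke or text.startswith(("joke", "funny"), i)
--     if greeting: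
--         return "greeting"
--     if farewell:
--         return "farewell"
--     if thanks:
--         return "thanks"
--     if feeling:
--         return "feeling"
--     if joke:
--         return "joke"
--     return "default"
-- ===== Notes on version B (the rewrite author's own statement) =====
-- stated objective: alternative
-- what changed: B makes a single left-to-right scan over character positions, maintaining one boolean flag per category (tuple startswith at each position), and resolves the flags in priority order afterwards, instead of A's five staged substring searches with early return.
import Mathlib
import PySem

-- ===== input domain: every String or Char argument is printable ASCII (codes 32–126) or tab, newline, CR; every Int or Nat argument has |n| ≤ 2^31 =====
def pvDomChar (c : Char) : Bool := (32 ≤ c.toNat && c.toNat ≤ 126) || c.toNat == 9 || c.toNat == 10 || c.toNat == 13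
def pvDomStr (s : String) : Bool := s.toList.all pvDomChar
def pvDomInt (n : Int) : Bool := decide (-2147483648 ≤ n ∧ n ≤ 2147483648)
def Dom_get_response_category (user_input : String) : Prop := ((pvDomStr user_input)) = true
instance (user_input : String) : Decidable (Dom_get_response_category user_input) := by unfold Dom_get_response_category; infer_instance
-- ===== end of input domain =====

-- B replaces A's five staged substring searches by ONE scan over character positions
-- keeping a boolean flag per category, resolved in priority order (objective: alternative).

-- ===== PORT A =====
def get_response_category (user_input : String) : String :=
  let user_input := PySem.Str.lower user_input
  if ["hello", "hi", "hey"].any (fun word => PySem.Str.isIn word user_input) then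
    "greeting"
  else if ["bye", "goodbye", "see you"].any (fun word => PySem.Str.isIn word user_input) then
    "farewell"
  else if ["thanks", "thank"].any (fun word => PySem.Str.isIn word user_input) then
    "thanks"
  else if ["feel", "feeling"].any (fun word => PySem.Str.isIn word user_input) then
    "feeling"
  else if ["joke", "funny"].any (fun word => PySem.Str.isIn word user_input) then
    "joke"
  else
    "default"

-- ===== PORT B =====
-- text.startswith((kw1, kw2, …), i) for 0 ≤ i: true iff some keyword is a prefix of
-- the suffix of text starting at i (exact for the in-range i the loop produces)
def pvStartsAny (t : List Char) (i : Int) (kws : List String) : Bool :=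
  kws.any (fun w => PySem.Chars.startswith (t.drop i.toNat) w.toList)

def get_response_category_alt (user_input : String) : String :=
  let t := (PySem.Str.lower user_input).toList
  let r := (PySem.List.pyRange 0 (t.length : Int) 1).foldl
    (fun s i =>
      (s.1 || pvStartsAny t i ["hello", "hi", "hey"],
       s.2.1 || pvStartsAny t i ["bye", "goodbye", "see you"],
       s.2.2.1 || pvStartsAny t i ["thanks", "thank"],
       s.2.2.2.1 || pvStartsAny t i ["feel", "feeling"],
       s.2.2.2.2 || pvStartsAny t i ["joke", "funny"]))
    (false, false, false, false, false)
  if r.1 then "greeting"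
  else if r.2.1 then "farewell"
  else if r.2.2.1 then "thanks"
  else if r.2.2.2.1 then "feeling"
  else if r.2.2.2.2 then "joke"
  else "default"

-- ===== PRECONDITION & SPEC =====
def Spec_get_response_category (user_input : String) (out : String) : Prop := out = get_response_category_alt user_input
instance (user_input : String) (out : String) : Decidable (Spec_get_response_category user_input out) := by unfold Spec_get_response_category; infer_instance

-- ===== CLAIM (what is proved, stated in full; the proofs are below) =====
def Claim_equal_get_response_category : Prop := ∀ (user_input : String), Dom_get_response_category user_input → Spec_get_response_category user_input (get_response_category user_input)

-- ===== LEMMAS AND PROOFS =====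

-- the 5-flag fold decomposes into five independent 'any' scans
theorem pvFold5 (l : List Int) (p1 p2 p3 p4 p5 : Int → Bool)
    (b1 b2 b3 b4 b5 : Bool) :
    l.foldl (fun (s : Bool × Bool × Bool × Bool × Bool) i =>
        (s.1 || p1 i, s.2.1 || p2 i, s.2.2.1 || p3 i, s.2.2.2.1 || p4 i, s.2.2.2.2 || p5 i))
      (b1, b2, b3, b4, b5)
    = (b1 || l.any p1, b2 || l.any p2, b3 || l.any p3, b4 || l.any p4, b5 || l.any p5) := by
  induction l generalizing b1 b2 b3 b4 b5 with
  | nil => simp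
  | cons x xs ih => simp [List.foldl_cons, ih, Bool.or_assoc]

-- a position scan for any keyword of a group equals the group's substring search
theorem pvScanEqIsIn (t : List Char) (kws : List String) (h : ∀ w ∈ kws, w.toList ≠ []) :
    (PySem.List.pyRange 0 (t.length : Int) 1).any (fun i => pvStartsAny t i kws)
      = kws.any (fun w => PySem.Chars.isIn w.toList t) := by
  rw [Bool.eq_iff_iff]
  simp only [List.any_eq_true, pvStartsAny, PySem.List.mem_pyRange_one,
    PySem.Chars.startswith_iff]
  constructor
  · rintro ⟨i, _, w, hw, hpre⟩
    refine ⟨w, hw, ?_⟩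
    rw [← PySem.Chars.exists_prefix_drop_iff_isIn]
    exact ⟨i.toNat, hpre⟩
  · rintro ⟨w, hw, hin⟩
    rw [← PySem.Chars.exists_prefix_drop_iff_isIn] at hin
    obtain ⟨j, hpre⟩ := hin
    have hwne : w.toList ≠ [] := h w hw
    have hlen : w.toList.length ≤ (t.drop j).length := hpre.length_le
    have hj : j < t.length := by
      rcases Nat.lt_or_ge j t.length with h' | h'
      · exact h'
      · exfalso
        have : t.drop j = [] := List.drop_eq_nil_of_le h'
        rw [this] at hpre
        exact hwne (List.prefix_nil.mp hpre)
    exact ⟨(j : Int), ⟨by positivity, by exact_mod_cast hj⟩, w, hw, by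
      simpa using hpre⟩

-- ===== VERDICT (by name: the statement is the Claim_ definition above) =====
theorem get_response_category_spec : Claim_equal_get_response_category := by
  intro user_input _
  unfold Spec_get_response_category get_response_category get_response_category_alt
  simp only []
  rw [pvFold5]
  rw [pvScanEqIsIn ((PySem.Str.lower user_input).toList) ["hello", "hi", "hey"] (by decide),
      pvScanEqIsIn ((PySem.Str.lower user_input).toList) ["bye", "goodbye", "see you"] (by decide),
      pvScanEqIsIn ((PySem.Str.lower user_input).toList) ["thanks", "thank"] (by decide),
      pvScanEqIsIn ((PySem.Str.lower user_input).toList) ["feel", "feeling"] (by decide),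
      pvScanEqIsIn ((PySem.Str.lower user_input).toList) ["joke", "funny"] (by decide)]
  simp only [Bool.false_or, PySem.Str.isIn_eq]
  rfl
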